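-- pv_equiv track=rewrite | github.com/cyhex/streamcrab | tracker/lib/tokenizer.py | charFold
-- ===== SOURCE A (Python) =====
-- def charFold(text):
--     # filter out chars that repeat longer then 3 times in a row
--     char_list = list(text)
--     clean_list = []
--
--     for i in range(len(char_list)):
--         _c = char_list[i]
--         if i > 0 and i < len(char_list)-1:
--             if _c != char_list[i-1] or  _c != char_list[i+1]:
--                 clean_list.append(_c)
--         else:
--             clean_list.append(_c)
--     return "".join(clean_list)
-- ===== SOURCE B (Python) =====
-- def charFold(text):
--     # run-length grouping: each maximal run of identical chars keeps at most its first two chars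
--     out = []
--     i = 0
--     n = len(text)
--     while i < n:
--         j = i + 1
--         while j < n and text[j] == text[i]:
--             j += 1
--         out.append(text[i] * min(j - i, 2))
--         i = j
--     return "".join(out)
-- ===== Notes on version B (the rewrite author's own statement) =====
-- stated objective: alternative
-- what changed: Replaces the per-index three-way neighbor comparison with run-length grouping: scan maximal runs of identical characters and keep at most the first two characters of each run.
import Mathlib
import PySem

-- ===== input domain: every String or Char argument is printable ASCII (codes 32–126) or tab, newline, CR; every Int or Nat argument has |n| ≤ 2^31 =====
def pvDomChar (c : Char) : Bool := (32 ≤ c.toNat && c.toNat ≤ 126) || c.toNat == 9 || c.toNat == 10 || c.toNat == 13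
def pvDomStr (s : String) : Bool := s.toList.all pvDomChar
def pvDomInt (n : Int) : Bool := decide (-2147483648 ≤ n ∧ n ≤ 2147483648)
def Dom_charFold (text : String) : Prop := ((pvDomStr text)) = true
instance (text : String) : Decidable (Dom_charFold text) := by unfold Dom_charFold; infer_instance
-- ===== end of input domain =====

-- B rewrites A's per-index neighbor test as run-length grouping (keep at most 2 chars per maximal run); objective: alternative (same cost, different algorithm).

-- ===== PORT A =====
def charFold (text : String) : String :=
  let charList := text.toList
  let cleanList := (PySem.List.pyRange 0 (charList.length : Int) 1).foldl (fun acc i =>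
    let c := PySem.List.pyGetD charList i ' '
    if i > 0 ∧ i < (charList.length : Int) - 1 then
      if c ≠ PySem.List.pyGetD charList (i - 1) ' ' ∨ c ≠ PySem.List.pyGetD charList (i + 1) ' ' then
        acc ++ [c]
      else acc
    else acc ++ [c]) ([] : List Char)
  String.ofList cleanList

-- ===== PORT B =====
-- runs of Source B's outer while loop: find the maximal run at the head, keep min(run, 2) copies, recurse on the remainder
def charFoldRuns : List Char → List Char
  | [] => []
  | c :: rest =>
    let run := rest.takeWhile (· == c)
    List.replicate (min (run.length + 1) 2) c ++ charFoldRuns (rest.dropWhile (· == c))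
termination_by l => l.length
decreasing_by
  simp only [List.length_cons]
  exact Nat.lt_succ_of_le (List.length_dropWhile_le _ _)

def charFold_alt (text : String) : String := String.ofList (charFoldRuns text.toList)

-- ===== PRECONDITION & SPEC =====
def Spec_charFold (text : String) (out : String) : Prop := out = charFold_alt text
instance (text : String) (out : String) : Decidable (Spec_charFold text out) := by unfold Spec_charFold; infer_instance

-- ===== CLAIM (what is proved, stated in full; the proofs are below) =====
def Claim_equal_charFold : Prop := ∀ (text : String), Dom_charFold text → Spec_charFold text (charFold text)

-- ===== LEMMAS AND PROOFS =====

-- per-index piece of A's loop body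
def gA (l : List Char) (i : Int) : List Char :=
  let c := PySem.List.pyGetD l i ' '
  if i > 0 ∧ i < (l.length : Int) - 1 then
    if c ≠ PySem.List.pyGetD l (i - 1) ' ' ∨ c ≠ PySem.List.pyGetD l (i + 1) ' ' then [c] else []
  else [c]

lemma charFold_eq_flatMap (text : String) :
    charFold text = String.ofList ((PySem.List.pyRange 0 (text.toList.length : Int) 1).flatMap (gA text.toList)) := by
  unfold charFold
  have h : (fun (acc : List Char) (i : Int) =>
      let c := PySem.List.pyGetD text.toList i ' '
      if i > 0 ∧ i < (text.toList.length : Int) - 1 then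
        if c ≠ PySem.List.pyGetD text.toList (i - 1) ' ' ∨ c ≠ PySem.List.pyGetD text.toList (i + 1) ' ' then
          acc ++ [c]
        else acc
      else acc ++ [c]) = (fun acc i => acc ++ gA text.toList i) := by
    funext acc i
    simp only [gA]
    split_ifs <;> simp
  simp only [h, PySem.List.foldl_append_eq_flatMap, List.nil_append]

-- indexing into a run-decomposed list
lemma pyGetD_rep_left (k : Nat) (c : Char) (rest : List Char) (i : Int) (h0 : 0 ≤ i) (hk : i < (k : Int)) :
    PySem.List.pyGetD (List.replicate k c ++ rest) i ' ' = c := by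
  rw [PySem.List.pyGetD_eq_getElem _ _ h0 (by simp; omega)]
  rw [List.getElem_append_left (by simp; omega)]
  simp

lemma pyGetD_rep_right (k : Nat) (c : Char) (rest : List Char) (j : Int) (h0 : 0 ≤ j) (hj : j < (rest.length : Int)) :
    PySem.List.pyGetD (List.replicate k c ++ rest) ((k : Int) + j) ' ' = PySem.List.pyGetD rest j ' ' := by
  rw [PySem.List.pyGetD_eq_getElem _ _ (by omega) (by simp; omega),
      PySem.List.pyGetD_eq_getElem _ _ h0 (by omega)]
  rw [List.getElem_append_right (by simp; omega)]
  congr 1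
  simp
  omega

-- index shift: past the first run, A's per-index piece only looks at the remainder
lemma gA_shift (k : Nat) (c : Char) (rest : List Char) (hk : 1 ≤ k)
    (hhead : rest.head? ≠ some c) (j : Int) (h0 : 0 ≤ j) (hj : j < (rest.length : Int)) :
    gA (List.replicate k c ++ rest) ((k : Int) + j) = gA rest j := by
  have hlen : ((List.replicate k c ++ rest).length : Int) = (k : Int) + (rest.length : Int) := by simp
  have hget : PySem.List.pyGetD (List.replicate k c ++ rest) ((k : Int) + j) ' ' = PySem.List.pyGetD rest j ' ' :=
    pyGetD_rep_right k c rest j h0 hj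
  rcases eq_or_lt_of_le h0 with h0' | hpos
  · -- j = 0 : first element of rest, kept on both sides
    subst h0'
    have hne : rest ≠ [] := by intro h; simp [h] at hj
    have hr0 : PySem.List.pyGetD rest 0 ' ' = rest.head hne := by
      rw [PySem.List.pyGetD_eq_getElem _ _ le_rfl (by omega)]
      simp [List.head_eq_getElem]
    have hneq : PySem.List.pyGetD rest 0 ' ' ≠ c := by
      rw [hr0]; intro h
      exact hhead (by rw [List.head?_eq_head hne, h])
    simp only [gA, add_zero] at *
    rw [hget]
    by_cases hmid : (k : Int) > 0 ∧ (k : Int) < ((List.replicate k c ++ rest).length : Int) - 1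
    · rw [if_pos hmid]
      have : PySem.List.pyGetD (List.replicate k c ++ rest) ((k : Int) - 1) ' ' = c :=
        pyGetD_rep_left k c rest ((k : Int) - 1) (by omega) (by omega)
      rw [if_pos (Or.inl (by rw [this]; exact hneq))]
      rw [if_neg (by omega)]
    · rw [if_neg hmid, if_neg (by omega)]
  · -- j ≥ 1 : neighbours are inside rest on both sides
    simp only [gA]
    rw [hget, hlen]
    have hiff : ((k : Int) + j > 0 ∧ (k : Int) + j < (k : Int) + (rest.length : Int) - 1) ↔
        (j > 0 ∧ j < (rest.length : Int) - 1) := by omega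
    by_cases hmid : j > 0 ∧ j < (rest.length : Int) - 1
    · rw [if_pos (hiff.mpr hmid), if_pos hmid]
      have hm1 : PySem.List.pyGetD (List.replicate k c ++ rest) ((k : Int) + j - 1) ' '
          = PySem.List.pyGetD rest (j - 1) ' ' := by
        have := pyGetD_rep_right k c rest (j - 1) (by omega) (by omega)
        rw [← this]; ring_nf
      have hp1 : PySem.List.pyGetD (List.replicate k c ++ rest) ((k : Int) + j + 1) ' '
          = PySem.List.pyGetD rest (j + 1) ' ' := by
        have := pyGetD_rep_right k c rest (j + 1) (by omega) (by omega)
        rw [← this]; ring_nf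
      rw [hm1, hp1]
    · rw [if_neg (by rw [hiff]; exact hmid), if_neg hmid]

-- first run: A keeps exactly min k 2 copies
lemma flatMap_first_run (k : Nat) (c : Char) (rest : List Char) (hk : 1 ≤ k)
    (hhead : rest.head? ≠ some c) :
    (PySem.List.pyRange 0 (k : Int) 1).flatMap (gA (List.replicate k c ++ rest))
      = List.replicate (min k 2) c := by
  set l := List.replicate k c ++ rest with hl
  have hlen : (l.length : Int) = (k : Int) + (rest.length : Int) := by simp [hl]
  have hg0 : gA l 0 = [c] := by
    simp only [gA]
    rw [if_neg (by omega)]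
    rw [pyGetD_rep_left k c rest 0 le_rfl (by omega)]
  rcases eq_or_lt_of_le hk with h1 | h2
  · -- k = 1
    have hk1 : (k : Int) = 1 := by omega
    rw [hk1, show PySem.List.pyRange 0 (1 : Int) 1 = [0] from rfl]
    have : min k 2 = 1 := by omega
    simp [hg0, this]
  · -- k ≥ 2
    have hmid : ∀ i ∈ PySem.List.pyRange 1 ((k : Int) - 1) 1, gA l i = [] := by
      intro i hi
      rw [PySem.List.mem_pyRange_one] at hi
      simp only [gA]
      rw [if_pos (by rw [hlen]; omega)]
      rw [pyGetD_rep_left k c rest i (by omega) (by omega),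
          pyGetD_rep_left k c rest (i - 1) (by omega) (by omega),
          pyGetD_rep_left k c rest (i + 1) (by omega) (by omega)]
      simp
    have hglast : gA l ((k : Int) - 1) = [c] := by
      simp only [gA]
      rw [pyGetD_rep_left k c rest ((k : Int) - 1) (by omega) (by omega)]
      by_cases hmid' : ((k : Int) - 1 > 0 ∧ (k : Int) - 1 < (l.length : Int) - 1)
      · rw [if_pos hmid']
        have hm1 : PySem.List.pyGetD l ((k : Int) - 1 - 1) ' ' = c :=
          pyGetD_rep_left k c rest ((k : Int) - 1 - 1) (by omega) (by omega)
        have hrne : rest ≠ [] := by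
          intro h
          have h2 := hmid'.2
          rw [hlen, h] at h2
          simp only [List.length_nil, Nat.cast_zero, add_zero] at h2
          omega
        have hp1 : PySem.List.pyGetD l ((k : Int) - 1 + 1) ' ' = PySem.List.pyGetD rest 0 ' ' := by
          rw [show ((k : Int) - 1 + 1) = ((k : Int) + 0) by ring, hl]
          exact pyGetD_rep_right k c rest 0 le_rfl (by simp [List.length_pos_iff.mpr hrne])
        have hneq : PySem.List.pyGetD rest 0 ' ' ≠ c := by
          rw [PySem.List.pyGetD_eq_getElem _ _ le_rfl (by simp [List.length_pos_iff.mpr hrne])]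
          intro h
          exact hhead (by rw [List.head?_eq_head hrne, ← h]; simp [List.head_eq_getElem])
        rw [if_pos (Or.inr (by rw [hp1]; exact fun h => hneq h.symm))]
      · rw [if_neg hmid']
    rw [PySem.List.pyRange_one_append 0 1 (k : Int) (by omega) (by omega)]
    rw [PySem.List.pyRange_one_append 1 ((k : Int) - 1) (k : Int) (by omega) (by omega)]
    rw [show PySem.List.pyRange ((k : Int) - 1) (k : Int) 1 = [(k : Int) - 1] by
      have h3 := PySem.List.pyRange_one_singleton ((k : Int) - 1)
      rw [show ((k : Int) - 1) + 1 = (k : Int) by ring] at h3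
      exact h3]
    rw [show PySem.List.pyRange 0 (1 : Int) 1 = [0] from rfl]
    simp only [List.flatMap_append, List.flatMap_cons, List.flatMap_nil, List.append_nil]
    rw [hg0, hglast, List.flatMap_eq_nil_iff.mpr hmid]
    have : min k 2 = 2 := by omega
    simp [this, List.replicate]

lemma flatMap_gA (l : List Char) :
    (PySem.List.pyRange 0 (l.length : Int) 1).flatMap (gA l) = charFoldRuns l := by
  induction l using charFoldRuns.induct with
  | case1 => simp [charFoldRuns, PySem.List.pyRange_one_eq_nil]
  | case2 c t ih =>
    set run := t.takeWhile (· == c) with hrun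
    set rest := t.dropWhile (· == c) with hrest
    set k := run.length + 1 with hkdef
    have hdecomp : c :: t = List.replicate k c ++ rest := by
      rw [hkdef]
      have h1 : run = List.replicate run.length c := by
        apply List.eq_replicate_of_mem
        intro b hb
        have := List.mem_takeWhile_imp (hrun ▸ hb)
        simpa using this
      calc c :: t = c :: (run ++ rest) := by rw [hrun, hrest, List.takeWhile_append_dropWhile]
        _ = (c :: run) ++ rest := rfl
        _ = List.replicate (run.length + 1) c ++ rest := by
            rw [List.replicate_succ]
            congr 1
            rw [← h1]
    have hhead : rest.head? ≠ some c := by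
      have : (t.dropWhile (· == c)).head? ≠ some c := by
        intro h
        have hne : t.dropWhile (· == c) ≠ [] := by intro h'; rw [h'] at h; simp at h
        have h2 := List.head_dropWhile_not (fun x => x == c) (w := hne)
        rw [List.head?_eq_some_head hne] at h
        rw [Option.some_inj.mp h] at h2
        simp at h2
      exact this
    have hk : 1 ≤ k := by omega
    have hlen : ((c :: t).length : Int) = (k : Int) + (rest.length : Int) := by
      rw [hdecomp]; simp
    have hruns : charFoldRuns (c :: t) = List.replicate (min k 2) c ++ charFoldRuns rest := by
      rw [charFoldRuns]
    rw [hruns]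
    rw [hlen, hdecomp,
        PySem.List.pyRange_one_append 0 (k : Int) ((k : Int) + (rest.length : Int)) (by omega) (by omega),
        List.flatMap_append,
        flatMap_first_run k c rest hk hhead]
    congr 1
    -- shift the second half of the range and use the induction hypothesis
    have hshift : (PySem.List.pyRange (k : Int) ((k : Int) + (rest.length : Int)) 1).flatMap
        (gA (List.replicate k c ++ rest))
        = (PySem.List.pyRange 0 (rest.length : Int) 1).flatMap (gA rest) := by
      rw [PySem.List.pyRange_one (k : Int), PySem.List.pyRange_one 0]
      simp only [add_sub_cancel_left, sub_zero, Int.toNat_natCast, List.flatMap_map]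
      apply List.flatMap_congr
      intro j hj
      rw [List.mem_range] at hj
      rw [zero_add]
      exact gA_shift k c rest hk hhead (j : Int) (by omega) (by omega)
    rw [hshift]
    exact ih

-- ===== VERDICT (by name: the statement is the Claim_ definition above) =====
theorem charFold_spec : Claim_equal_charFold := by
  intro text _
  show _ = _
  rw [charFold_eq_flatMap, flatMap_gA]
  rfl
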